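-- pv_equiv track=rewrite | github.com/Fidget278/2022-Algorithm-Study | 개인문제/편근형/행렬과 연산.py | solution
-- ===== SOURCE A (Python) =====
-- from collections import deque
-- from collections import deque
--
-- def solution(rc, operations):
--     l = len(rc)
--     row = deque(deque(i[1:-1]) for i in rc)
--     col = [deque(rc[i][0] for i in range(l)), deque([rc[i][len(rc[0])-1] for i in range(l)])]
--     for i in operations:
--         if i[0] == "S":
--             if len(row) != 0:
--                 row.appendleft(row.pop())
--             col[0].appendleft(col[0].pop())
--             col[1].appendleft(col[1].pop())
--         else:
--             if len(row) != 0: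
--                 row[l-1].append(col[1].pop())
--             col[0].append(row[l-1].popleft())
--             row[0].appendleft(col[0].popleft())
--             col[1].appendleft(row[0].pop())
--
--     answer = []
--     for i in range(l):
--         answer.append([])
--         answer[i].append(col[0][i])
--         answer[i].extend(row[i])
--         answer[i].append(col[1][i])
--     return answer
-- ===== SOURCE B (Python) =====
-- def _rotate(m):
--     n, w = len(m), len(m[0])
--     if n == 1:
--         return [m[0][-1:] + m[0][:-1]]
--     if w == 1:
--         return m[-1:] + m[:-1]
--     left = [r[0] for r in m]
--     right = [r[-1] for r in m]
--     inner = [r[1:-1] for r in m]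
--     new_left = left[1:] + [m[-1][1]]
--     new_right = [m[0][-2]] + right[:-1]
--     new_inner = [([left[0]] + inner[0])[:-1]] + inner[1:-1] + [(inner[-1] + [right[-1]])[1:]]
--     return [[l] + c + [r] for l, c, r in zip(new_left, new_inner, new_right)]
--
--
-- def solution(rc, operations):
--     m = [list(r) for r in rc]
--     for op in operations:
--         if op[0] == "S":
--             m = m[-1:] + m[:-1]
--         else:
--             m = _rotate(m)
--     return m
-- ===== Notes on version B (the rewrite author's own statement) =====
-- stated objective: simpler
-- what changed: B keeps the whole matrix as its only state (rotating the row list on ShiftRow and rewriting the border columns/inner rows on Rotate) instead of A's three separate deques (interior rows, left column, right column) mutated corner-by-corner and reassembled at the end.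
-- intended difference: On single-column matrices A returns the column duplicated into two columns (even with no operations), and on a single-row matrix with a Rotate A only swaps the left corner with the first interior cell; B returns the matrix with its border genuinely rotated one step clockwise, the intended result. — e.g. on solution([[1], [2]], ["Rotate"]): A returns [[2, 1], [2, 1]], B returns [[2], [1]]
-- outside the precondition, e.g. on solution([[1, 2], [3, 4, 5]], ['Rotate']): A returns [[3, 1], [4, 4, 2]], B returns [[3, 1], [4, 5, 2]]
import Mathlib
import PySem

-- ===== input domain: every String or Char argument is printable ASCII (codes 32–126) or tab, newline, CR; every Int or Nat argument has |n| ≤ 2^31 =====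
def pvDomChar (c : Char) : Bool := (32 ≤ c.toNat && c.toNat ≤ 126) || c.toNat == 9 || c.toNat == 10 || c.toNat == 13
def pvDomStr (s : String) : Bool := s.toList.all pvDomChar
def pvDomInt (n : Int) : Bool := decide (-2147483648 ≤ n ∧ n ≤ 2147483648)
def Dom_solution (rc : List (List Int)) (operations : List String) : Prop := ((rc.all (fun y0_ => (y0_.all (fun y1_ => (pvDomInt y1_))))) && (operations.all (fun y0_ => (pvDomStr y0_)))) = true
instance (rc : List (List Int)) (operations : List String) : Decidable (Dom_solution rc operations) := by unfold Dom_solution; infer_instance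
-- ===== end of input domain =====

-- B maintains the whole matrix (rotating the row list on "S", rewriting border columns on Rotate)
-- instead of A's split interior/left-column/right-column deques; objective: simpler. Neither mutates rc.

-- ===== PORT A =====
-- one loop iteration of A over (row, col[0], col[1]); deques are lists, pop/appendleft/append spelt out
def pvStepA (l : Nat) (st : List (List Int) × List Int × List Int) (op : String) :
    List (List Int) × List Int × List Int :=
  match st with
  | (row, col0, col1) =>
    if PySem.Str.pyGet? op 0 = some 'S' then
      let row' := if row.isEmpty then row else row.getLastD [] :: row.dropLast
      (row', col0.getLastD 0 :: col0.dropLast, col1.getLastD 0 :: col1.dropLast)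
    else
      -- if len(row) != 0: row[l-1].append(col[1].pop())
      let row1 := if row.isEmpty then row
        else row.set (l - 1) (PySem.List.pyGetD row ((l : Int) - 1) [] ++ [col1.getLastD 0])
      let col1 := if row.isEmpty then col1 else col1.dropLast
      -- col[0].append(row[l-1].popleft())
      let r2 := PySem.List.pyGetD row1 ((l : Int) - 1) []
      let col0 := col0 ++ [r2.headD 0]
      let row2 := row1.set (l - 1) r2.tail
      -- row[0].appendleft(col[0].popleft())
      let r3 := PySem.List.pyGetD row2 0 []
      let row3 := row2.set 0 (col0.headD 0 :: r3)
      let col0 := col0.tail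
      -- col[1].appendleft(row[0].pop())
      let r4 := PySem.List.pyGetD row3 0 []
      let col1 := r4.getLastD 0 :: col1
      let row4 := row3.set 0 r4.dropLast
      (row4, col0, col1)

def solution (rc : List (List Int)) (operations : List String) : List (List Int) :=
  let l := rc.length
  let row := rc.map (fun r => PySem.List.slice r (some 1) (some (-1)))
  let col0 := (PySem.List.pyRange 0 (l : Int) 1).map
      (fun i => PySem.List.pyGetD (PySem.List.pyGetD rc i []) 0 0)
  let col1 := (PySem.List.pyRange 0 (l : Int) 1).map
      (fun i => PySem.List.pyGetD (PySem.List.pyGetD rc i []) (((rc.headD []).length : Int) - 1) 0)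
  let st := operations.foldl (pvStepA l) (row, col0, col1)
  (PySem.List.pyRange 0 (l : Int) 1).map
      (fun i => PySem.List.pyGetD st.2.1 i 0 :: (PySem.List.pyGetD st.1 i [] ++ [PySem.List.pyGetD st.2.2 i 0]))

-- ===== PORT B =====
-- _rotate: shift every border value one step clockwise, rebuilt from whole rows/columns
def pvRotB (m : List (List Int)) : List (List Int) :=
  let n := m.length
  let w := (m.headD []).length
  if n = 1 then
    [PySem.List.slice (PySem.List.pyGetD m 0 []) (some (-1)) none
      ++ PySem.List.slice (PySem.List.pyGetD m 0 []) none (some (-1))]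
  else if w = 1 then
    PySem.List.slice m (some (-1)) none ++ PySem.List.slice m none (some (-1))
  else
    let left := m.map (fun r => PySem.List.pyGetD r 0 0)
    let right := m.map (fun r => PySem.List.pyGetD r (-1) 0)
    let inner := m.map (fun r => PySem.List.slice r (some 1) (some (-1)))
    let newLeft := PySem.List.slice left (some 1) none
        ++ [PySem.List.pyGetD (PySem.List.pyGetD m (-1) []) 1 0]
    let newRight := PySem.List.pyGetD (PySem.List.pyGetD m 0 []) (-2) 0
        :: PySem.List.slice right none (some (-1))
    let newInner := PySem.List.slice (PySem.List.pyGetD left 0 0 :: PySem.List.pyGetD inner 0 []) none (some (-1))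
        :: (PySem.List.slice inner (some 1) (some (-1))
            ++ [PySem.List.slice (PySem.List.pyGetD inner (-1) [] ++ [PySem.List.pyGetD right (-1) 0]) (some 1) none])
    (newLeft.zip (newInner.zip newRight)).map (fun p => p.1 :: (p.2.1 ++ [p.2.2]))

def solution_alt (rc : List (List Int)) (operations : List String) : List (List Int) :=
  operations.foldl
    (fun m op =>
      if PySem.Str.pyGet? op 0 = some 'S' then
        PySem.List.slice m (some (-1)) none ++ PySem.List.slice m none (some (-1))
      else pvRotB m)
    rc

-- ===== PRECONDITION & SPEC =====
-- Pre_ keeps A's natural domain: a rectangular matrix with at least one column (A indexes rc[i][0]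
-- and rc[i][len(rc[0])-1], which is meaningless or raises on ragged/zero-width input), nonempty
-- operation strings (op[0] raises IndexError on ""), and a nonempty matrix whenever there is an
-- operation (A pops from empty deques otherwise).
def Pre_solution (rc : List (List Int)) (operations : List String) : Prop :=
  (∀ op ∈ operations, op ≠ "") ∧
  (operations ≠ [] → rc ≠ []) ∧
  (∀ r ∈ rc, r.length = (rc.headD []).length) ∧
  (rc ≠ [] → 1 ≤ (rc.headD []).length)
instance (rc : List (List Int)) (operations : List String) : Decidable (Pre_solution rc operations) := by
  unfold Pre_solution; infer_instance

def pvWitness_solution : List (List Int) × List String := ([[1, 2], [3, 4]], ["ShiftRow", "Rotate"])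

-- On single-column matrices A outputs the column duplicated into two columns (even with no
-- operations), and on a single-row matrix a Rotate in A only swaps the left corner with the first
-- interior cell; B returns the matrix with its border genuinely rotated one step, the intended result.
def D_solution (rc : List (List Int)) (operations : List String) : Prop :=
  (rc ≠ [] ∧ (rc.headD []).length = 1) ∨
  (rc.length = 1 ∧ ∃ op ∈ operations, ¬ (PySem.Str.pyGet? op 0 = some 'S'))
instance (rc : List (List Int)) (operations : List String) : Decidable (D_solution rc operations) := by
  unfold D_solution; infer_instance

def Spec_solution (rc : List (List Int)) (operations : List String) (out : List (List Int)) : Prop :=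
  ¬ D_solution rc operations → out = solution_alt rc operations
instance (rc : List (List Int)) (operations : List String) (out : List (List Int)) : Decidable (Spec_solution rc operations out) := by
  unfold Spec_solution; infer_instance

def pvDiffWitness_solution : List (List Int) × List String := ([[1], [2]], ["Rotate"])
def pvDiffWitnessOut_solution : (List (List Int)) × (List (List Int)) := ([[2, 1], [2, 1]], [[2], [1]])

-- ===== CLAIM (what is proved, stated in full; the proofs are below) =====
def Claim_unchanged_solution : Prop := ∀ (rc : List (List Int)) (operations : List String), Dom_solution rc operations → Pre_solution rc operations → Spec_solution rc operations (solution rc operations)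
def Claim_changed_solution : Prop := Dom_solution (pvDiffWitness_solution.1) (pvDiffWitness_solution.2) ∧ Pre_solution (pvDiffWitness_solution.1) (pvDiffWitness_solution.2) ∧ D_solution (pvDiffWitness_solution.1) (pvDiffWitness_solution.2) ∧ solution (pvDiffWitness_solution.1) (pvDiffWitness_solution.2) = pvDiffWitnessOut_solution.1 ∧ solution_alt (pvDiffWitness_solution.1) (pvDiffWitness_solution.2) = pvDiffWitnessOut_solution.2 ∧ pvDiffWitnessOut_solution.1 ≠ pvDiffWitnessOut_solution.2

-- ===== LEMMAS AND PROOFS =====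


theorem pvSlice11 {α : Type} (xs : List α) : PySem.List.slice xs (some 1) (some (-1)) = xs.tail.dropLast := by
  cases xs with
  | nil => simp [PySem.List.slice]
  | cons x t =>
    simp [PySem.List.slice, PySem.List.clampIdx, List.dropLast_eq_take]
    split <;> omega

theorem pvGet0 {α : Type} (xs : List α) (d : α) : PySem.List.pyGetD xs 0 d = xs.headD d := by
  cases xs <;> simp [PySem.List.pyGetD, PySem.List.pyGet?, PySem.List.pyIdx?]

theorem pvGetNeg1 {α : Type} (xs : List α) (d : α) : PySem.List.pyGetD xs (-1) d = xs.getLastD d := by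
  cases xs with
  | nil => simp [PySem.List.pyGetD, PySem.List.pyGet?, PySem.List.pyIdx?]
  | cons x t => simp [PySem.List.pyGetD, PySem.List.pyGet?_neg_one]

theorem pvGet1 {α : Type} (xs : List α) (d : α) : PySem.List.pyGetD xs 1 d = xs.tail.headD d := by
  match xs with
  | [] => simp [PySem.List.pyGetD, PySem.List.pyGet?, PySem.List.pyIdx?]
  | [a] => simp [PySem.List.pyGetD, PySem.List.pyGet?, PySem.List.pyIdx?]
  | a :: b :: t => simp [PySem.List.pyGetD, PySem.List.pyGet?, PySem.List.pyIdx?]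

theorem pvSetLast {α : Type} (xs : List α) (x v : α) : (xs ++ [x]).set xs.length v = xs ++ [v] := by
  induction xs with
  | nil => simp
  | cons a t ih => simp [ih]

theorem pvDropSub1 {α : Type} [Inhabited α] (m : List α) (hm : m ≠ []) :
    m.drop (m.length - 1) = [m.getLastD default] := by
  induction m with
  | nil => simp at hm
  | cons a t ih =>
    cases t with
    | nil => simp
    | cons b u => simpa [List.getLastD_cons] using ih (by simp)

theorem pvGetDLast {α : Type} (xs : List α) (d : α) (l : Nat) (hx : xs ≠ []) (hl : xs.length = l) :
    PySem.List.pyGetD xs ((l : Int) - 1) d = xs.getLastD d := by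
  subst hl
  have hlen : 1 ≤ xs.length := by cases xs with
    | nil => exact absurd rfl hx
    | cons a t => simp
  have h1 : ((xs.length : Int) - 1) = ((xs.length - 1 : Nat) : Int) := by push_cast [hlen]; ring
  rw [h1, PySem.List.pyGetD_natCast]
  rw [List.getD_eq_getElem _ _ (by omega)]
  rw [List.getLastD_eq_getLast?, List.getLast?_eq_getElem?,
    List.getElem?_eq_getElem (by omega)]
  rfl

theorem pvGetNeg2 (r : List Int) (h : 2 ≤ r.length) :
    PySem.List.pyGetD r (-2) 0 = r.dropLast.getLastD 0 := by
  rw [PySem.List.pyGetD_neg_ofNat r 2 0 (by omega) (by omega)]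
  rw [List.getLastD_eq_getLast?, List.getLast?_eq_getElem?, List.length_dropLast,
    List.getElem?_eq_getElem (by rw [List.length_dropLast]; omega)]
  rw [List.getElem_dropLast]
  have : r.length - 1 - 1 = r.length - 2 := by omega
  simp [this]

theorem pvDropLastEq {α : Type} (r : List α) (d : α) (h : 2 ≤ r.length) :
    r.headD d :: r.tail.dropLast = r.dropLast := by
  cases r with
  | nil => simp at h
  | cons a t => cases t with
    | nil => simp at h
    | cons b u => simp

theorem pvTailEq {α : Type} (r : List α) (e : α) (h : 2 ≤ r.length) :
    r.tail.dropLast ++ [r.getLastD e] = r.tail := by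
  cases r with
  | nil => simp at h
  | cons a t =>
    have ht : t ≠ [] := by cases t with
      | nil => simp at h
      | cons b u => simp
    rw [List.getLastD_cons, List.tail_cons, List.getLastD_eq_getLast?,
      List.getLast?_eq_some_getLast (h := ht)]
    exact List.dropLast_append_getLast ht

theorem pvReassemble {α : Type} (r : List α) (d e : α) (h : 2 ≤ r.length) :
    r.headD d :: (r.tail.dropLast ++ [r.getLastD e]) = r := by
  rw [pvTailEq r e h]
  cases r with
  | nil => simp at h
  | cons a t => simp

theorem pvMapRangeGetD {α β : Type} (xs : List α) (f : α → β) (d : α) :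
    (List.range xs.length).map (fun i => f (xs.getD i d)) = xs.map f := by
  apply List.ext_getElem <;> simp
  intro i h1 h2
  rw [List.getElem?_eq_getElem h2, Option.getD_some]

theorem pvMapGetLastD {α β : Type} (f : α → β) (d : β) (e : α) :
    ∀ (m : List α), m ≠ [] → (m.map f).getLastD d = f (m.getLastD e)
  | [a], _ => rfl
  | a :: b :: t, _ => by
    rw [List.map_cons, List.getLastD_cons, List.getLastD_cons]
    exact pvMapGetLastD f (f a) a (b :: t) (by simp)

theorem pvMapDropLast {α β : Type} (f : α → β) (m : List α) :
    (m.map f).dropLast = m.dropLast.map f := by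
  induction m with
  | nil => simp
  | cons a t ih => cases t <;> simp_all

theorem pvGetLastDConcat {α : Type} (c : List α) (x : α) (d : α) : (c ++ [x]).getLastD d = x := by
  induction c generalizing d with
  | nil => rfl
  | cons a t ih => rw [List.cons_append, List.getLastD_cons, ih]

theorem pvZipMap (L : List Int) :
    ∀ (C : List (List Int)) (R : List Int), C.length = L.length → R.length = L.length →
      ((L.zip (C.zip R)).map fun p => p.1 :: (p.2.1 ++ [p.2.2])).map (fun r => r.headD 0) = L
    ∧ ((L.zip (C.zip R)).map fun p => p.1 :: (p.2.1 ++ [p.2.2])).map (fun r => r.tail.dropLast) = C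
    ∧ ((L.zip (C.zip R)).map fun p => p.1 :: (p.2.1 ++ [p.2.2])).map (fun r => r.getLastD 0) = R := by
  induction L with
  | nil => intro C R h1 h2; simp_all [List.length_eq_zero_iff]
  | cons l L ih =>
    intro C R h1 h2
    cases C with
    | nil => simp at h1
    | cons c C' =>
      cases R with
      | nil => simp at h2
      | cons r R' =>
        obtain ⟨e1, e2, e3⟩ := ih C' R' (by simpa using h1) (by simpa using h2)
        refine ⟨?_, ?_, ?_⟩ <;> simp only [List.zip_cons_cons, List.map_cons]
        · rw [e1]; rfl
        · rw [List.tail_cons, List.dropLast_concat, e2]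
        · rw [List.getLastD_cons, pvGetLastDConcat, e3]

theorem pvZipMapLen (L : List Int) (C : List (List Int)) (R : List Int)
    (h1 : C.length = L.length) (h2 : R.length = L.length) :
    ((L.zip (C.zip R)).map fun p => p.1 :: (p.2.1 ++ [p.2.2])).length = L.length := by
  simp [h1, h2]

theorem pvZipMapGood (w : Nat) (L : List Int) (C : List (List Int)) (R : List Int)
    (hw : 2 ≤ w) (hC : ∀ c ∈ C, c.length = w - 2) :
    ∀ r ∈ (L.zip (C.zip R)).map fun p => p.1 :: (p.2.1 ++ [p.2.2]), r.length = w := by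
  intro r hr
  obtain ⟨p, hp, rfl⟩ := List.mem_map.1 hr
  obtain ⟨-, h2'⟩ := List.of_mem_zip hp
  obtain ⟨hc, -⟩ := List.of_mem_zip h2'
  simp [hC _ hc]
  omega

theorem pvGetLastDMem {α : Type} : ∀ (m : List α) (d : α), m ≠ [] → m.getLastD d ∈ m
  | [a], _, _ => List.mem_singleton.2 rfl
  | a :: b :: t, d, _ => by
    rw [List.getLastD_cons]
    exact List.mem_cons_of_mem a (pvGetLastDMem (b :: t) a (by simp))

-- proof-side views of A's loop state: interior, left column, right column of a row
def pvHd (r : List Int) : Int := r.headD 0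
def pvLst (r : List Int) : Int := r.getLastD 0
def pvInn (r : List Int) : List Int := r.tail.dropLast
def pvPhi (m : List (List Int)) : List (List Int) × List Int × List Int :=
  (m.map pvInn, m.map pvHd, m.map pvLst)
def pvStepB (m : List (List Int)) (op : String) : List (List Int) :=
  if PySem.Str.pyGet? op 0 = some 'S' then
    PySem.List.slice m (some (-1)) none ++ PySem.List.slice m none (some (-1))
  else pvRotB m

theorem pvAltEq (rc : List (List Int)) (ops : List String) :
    solution_alt rc ops = ops.foldl pvStepB rc := rfl

def pvInit (rc : List (List Int)) : List (List Int) × List Int × List Int :=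
  (rc.map (fun r => PySem.List.slice r (some 1) (some (-1))),
   (PySem.List.pyRange 0 (rc.length : Int) 1).map
      (fun i => PySem.List.pyGetD (PySem.List.pyGetD rc i []) 0 0),
   (PySem.List.pyRange 0 (rc.length : Int) 1).map
      (fun i => PySem.List.pyGetD (PySem.List.pyGetD rc i []) (((rc.headD []).length : Int) - 1) 0))

theorem pvSolutionEq (rc : List (List Int)) (ops : List String) :
    solution rc ops = (PySem.List.pyRange 0 (rc.length : Int) 1).map
      (fun i => PySem.List.pyGetD (ops.foldl (pvStepA rc.length) (pvInit rc)).2.1 i 0 ::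
        (PySem.List.pyGetD (ops.foldl (pvStepA rc.length) (pvInit rc)).1 i [] ++
         [PySem.List.pyGetD (ops.foldl (pvStepA rc.length) (pvInit rc)).2.2 i 0])) := rfl

theorem pvShiftSliceEq (m : List (List Int)) (hm : m ≠ []) :
    PySem.List.slice m (some (-1)) none ++ PySem.List.slice m none (some (-1))
      = m.getLastD [] :: m.dropLast := by
  rw [PySem.List.slice_from_neg_one, PySem.List.slice_to_neg_one, pvDropSub1 m hm]
  rfl

theorem pvStepShift (l : Nat) (op : String) (hop : PySem.Str.pyGet? op 0 = some 'S')
    (m : List (List Int)) (hm : m ≠ []) :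
    pvStepA l (pvPhi m) op = pvPhi (m.getLastD [] :: m.dropLast) := by
  have hrow : (m.map pvInn).isEmpty = false := by
    cases m with
    | nil => exact absurd rfl hm
    | cons x t => rfl
  simp only [pvStepA, pvPhi, hop, if_true, hrow, Bool.false_eq_true, if_false, List.map_cons]
  rw [pvMapGetLastD pvInn [] [] m hm, pvMapGetLastD pvHd 0 [] m hm, pvMapGetLastD pvLst 0 [] m hm,
    pvMapDropLast, pvMapDropLast, pvMapDropLast]

-- the common result of one Rotate on (a :: mid) ++ [b] (w ≥ 2 columns)
def pvRotRes (a b : List Int) (mid : List (List Int)) :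
    List (List Int) × List Int × List Int :=
  (a.dropLast.dropLast :: (mid.map pvInn ++ [b.tail.tail]),
   (mid.map pvHd ++ [pvHd b]) ++ [b.tail.headD 0],
   a.dropLast.getLastD 0 :: (pvLst a :: mid.map pvLst))

theorem pvGetLastDCons2 {α : Type} (x : α) (c : List α) (y d : α) :
    (x :: (c ++ [y])).getLastD d = y := by
  rw [List.getLastD_cons, pvGetLastDConcat]

theorem pvDropLastCons2 {α : Type} (x : α) (c : List α) (y : α) :
    (x :: (c ++ [y])).dropLast = x :: c := by
  rw [← List.cons_append, List.dropLast_concat]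

theorem pvGetDLastCons {α β : Type} (x0 : α) (mid : List β) (f : β → α) (y d : α) :
    PySem.List.pyGetD (x0 :: (mid.map f ++ [y])) (((mid.length + 2 : Nat) : Int) - 1) d = y := by
  rw [pvGetDLast _ d (mid.length + 2) (by simp) (by simp)]
  exact pvGetLastDCons2 _ _ _ _

theorem pvSetLastCons {α β : Type} (x0 : α) (mid : List β) (f : β → α) (y v : α) :
    (x0 :: (mid.map f ++ [y])).set (mid.length + 2 - 1) v = x0 :: (mid.map f ++ [v]) := by
  have hidx : mid.length + 2 - 1 = (x0 :: mid.map f).length := by simp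
  rw [hidx, ← List.cons_append, pvSetLast, List.cons_append]

theorem pvStepARot (w : Nat) (hw : 2 ≤ w) (op : String)
    (hop : ¬ (PySem.Str.pyGet? op 0 = some 'S'))
    (a b : List Int) (mid : List (List Int)) (ha : a.length = w) (hb : b.length = w) :
    pvStepA (mid.length + 2) (pvPhi ((a :: mid) ++ [b])) op = pvRotRes a b mid := by
  have ha2 : 2 ≤ a.length := ha ▸ hw
  have hb2 : 2 ≤ b.length := hb ▸ hw
  have hInnTail : pvInn b ++ [pvLst b] = b.tail := pvTailEq b 0 hb2
  have hDropA : pvHd a :: pvInn a = a.dropLast := pvDropLastEq a 0 ha2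
  have hphi : pvPhi ((a :: mid) ++ [b]) =
      (pvInn a :: (mid.map pvInn ++ [pvInn b]),
       pvHd a :: (mid.map pvHd ++ [pvHd b]),
       pvLst a :: (mid.map pvLst ++ [pvLst b])) := by
    simp [pvPhi]
  rw [hphi]
  simp only [pvStepA, hop, if_false, List.isEmpty_cons, Bool.false_eq_true]
  rw [pvGetDLastCons (pvInn a) mid pvInn (pvInn b) []]
  rw [pvGetLastDCons2 (pvLst a) (mid.map pvLst) (pvLst b) 0]
  rw [pvSetLastCons (pvInn a) mid pvInn (pvInn b) (pvInn b ++ [pvLst b])]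
  rw [pvGetDLastCons (pvInn a) mid pvInn (pvInn b ++ [pvLst b]) []]
  rw [pvSetLastCons (pvInn a) mid pvInn (pvInn b ++ [pvLst b]) ((pvInn b ++ [pvLst b]).tail)]
  rw [pvDropLastCons2 (pvLst a) (mid.map pvLst) (pvLst b)]
  simp only [pvGet0, List.cons_append, List.append_assoc, List.headD_cons,
    List.set_cons_zero, List.tail_cons]
  rw [hInnTail, hDropA]
  simp [pvRotRes, List.append_assoc]

theorem pvRotBEq (w : Nat) (hw : 2 ≤ w) (a b : List Int) (mid : List (List Int))
    (ha : a.length = w) (hb : b.length = w) :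
    pvRotB ((a :: mid) ++ [b]) =
      (((pvRotRes a b mid).2.1).zip (((pvRotRes a b mid).1).zip ((pvRotRes a b mid).2.2))).map
        (fun p => p.1 :: (p.2.1 ++ [p.2.2])) := by
  have ha2 : 2 ≤ a.length := ha ▸ hw
  have hb2 : 2 ≤ b.length := hb ▸ hw
  have hInnTail : pvInn b ++ [pvLst b] = b.tail := pvTailEq b 0 hb2
  have hDropA : pvHd a :: pvInn a = a.dropLast := pvDropLastEq a 0 ha2
  have hmapInn : (fun r : List Int => PySem.List.slice r (some 1) (some (-1))) = pvInn := by
    funext r; rw [pvSlice11]; rfl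
  have hmapHd : (fun r : List Int => PySem.List.pyGetD r 0 0) = pvHd := by
    funext r; rw [pvGet0]; rfl
  have hmapLst : (fun r : List Int => PySem.List.pyGetD r (-1) 0) = pvLst := by
    funext r; rw [pvGetNeg1]; rfl
  simp only [pvRotB, hmapInn, hmapHd, hmapLst, List.cons_append, List.length_cons,
    List.length_append, List.headD_cons]
  rw [if_neg (by omega), if_neg (by omega)]
  simp only [pvGetNeg1, pvGet0, pvGet1, List.map_cons, List.map_append, List.map_nil,
    List.headD_cons, List.tail_cons, List.getLastD_cons, PySem.List.slice_from_one,
    PySem.List.slice_to_neg_one, pvSlice11]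
  rw [pvGetNeg2 a ha2]
  rw [pvGetLastDConcat, pvGetLastDConcat, pvGetLastDConcat, List.dropLast_concat]
  rw [pvDropLastCons2 (pvLst a) (mid.map pvLst) (pvLst b)]
  rw [hInnTail, hDropA]
  simp [pvRotRes, List.append_assoc]

theorem pvInnLen (r : List Int) (w : Nat) (hr : r.length = w) : (pvInn r).length = w - 2 := by
  simp [pvInn, hr, Nat.sub_sub]

theorem pvStepEq (w n : Nat) (hw : 2 ≤ w) (op : String) (m : List (List Int))
    (hm : m ≠ []) (hlen : m.length = n) (good : ∀ r ∈ m, r.length = w)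
    (hop2 : PySem.Str.pyGet? op 0 = some 'S' ∨ 2 ≤ n) :
    pvStepA n (pvPhi m) op = pvPhi (pvStepB m op)
    ∧ pvStepB m op ≠ [] ∧ (pvStepB m op).length = n ∧ ∀ r ∈ pvStepB m op, r.length = w := by
  have hlen1 : 1 ≤ m.length := by
    cases m with
    | nil => exact absurd rfl hm
    | cons x t => simp
  by_cases hS : PySem.Str.pyGet? op 0 = some 'S'
  · have hBe : pvStepB m op = m.getLastD [] :: m.dropLast := by
      rw [pvStepB, if_pos hS, pvShiftSliceEq m hm]
    refine ⟨?_, ?_, ?_, ?_⟩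
    · rw [pvStepShift n op hS m hm, hBe]
    · simp [hBe]
    · rw [hBe]; simp; omega
    · intro r hr
      rw [hBe] at hr
      rcases List.mem_cons.1 hr with h | h
      · exact h ▸ good _ (pvGetLastDMem m [] hm)
      · exact good _ (List.dropLast_subset _ h)
  · have hn2 : 2 ≤ n := hop2.resolve_left hS
    have hm2 : 2 ≤ m.length := hlen ▸ hn2
    have hdec : m = (m.headD [] :: m.tail.dropLast) ++ [m.getLastD []] := by
      rw [List.cons_append]
      exact (pvReassemble m [] [] hm2).symm
    set a := m.headD [] with hadef
    set mid := m.tail.dropLast with hmiddef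
    set b := m.getLastD [] with hbdef
    have hamem : a ∈ m := by
      rw [hadef]
      cases m with
      | nil => exact absurd rfl hm
      | cons x t => simp
    have hbmem : b ∈ m := pvGetLastDMem m [] hm
    have hmidmem : ∀ r ∈ mid, r ∈ m := by
      intro r hr
      exact List.tail_subset m (List.dropLast_subset _ hr)
    have ha : a.length = w := good a hamem
    have hb : b.length = w := good b hbmem
    have hmid : ∀ r ∈ mid, r.length = w := fun r hr => good r (hmidmem r hr)
    have hn : n = mid.length + 2 := by
      have := congrArg List.length hdec
      rw [hlen] at this
      simpa using this
    have hBe : pvStepB m op = pvRotB ((a :: mid) ++ [b]) := by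
      rw [pvStepB, if_neg hS, hdec]
    rw [hBe, pvRotBEq w hw a b mid ha hb]
    have hlenNL : (pvRotRes a b mid).2.1.length = mid.length + 2 := by
      simp [pvRotRes]
    have hlenNI : (pvRotRes a b mid).1.length = (pvRotRes a b mid).2.1.length := by
      simp [pvRotRes]
    have hlenNR : (pvRotRes a b mid).2.2.length = (pvRotRes a b mid).2.1.length := by
      simp [pvRotRes]
    obtain ⟨e1, e2, e3⟩ := pvZipMap (pvRotRes a b mid).2.1 (pvRotRes a b mid).1
      (pvRotRes a b mid).2.2 hlenNI hlenNR
    have hphiz : pvPhi ((((pvRotRes a b mid).2.1).zip (((pvRotRes a b mid).1).zip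
        ((pvRotRes a b mid).2.2))).map (fun p => p.1 :: (p.2.1 ++ [p.2.2])))
        = pvRotRes a b mid := by
      rw [pvPhi]
      rw [show (fun r : List Int => r.tail.dropLast) = pvInn from rfl] at e2
      rw [show (fun r : List Int => r.headD 0) = pvHd from rfl] at e1
      rw [show (fun r : List Int => r.getLastD 0) = pvLst from rfl] at e3
      rw [e1, e2, e3]
    have hCgood : ∀ c ∈ (pvRotRes a b mid).1, c.length = w - 2 := by
      intro c hc
      simp only [pvRotRes] at hc
      rcases List.mem_cons.1 hc with h | hc2
      · subst h; simp [ha, Nat.sub_sub]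
      rcases List.mem_append.1 hc2 with hc3 | hc4
      · obtain ⟨r, hr, rfl⟩ := List.mem_map.1 hc3
        exact pvInnLen r w (hmid r hr)
      · rw [List.mem_singleton.1 hc4]
        simp [hb, Nat.sub_sub]
    refine ⟨?_, ?_, ?_, ?_⟩
    · rw [hphiz, hn]
      rw [show pvPhi m = pvPhi ((a :: mid) ++ [b]) from by rw [← hdec]]
      exact pvStepARot w hw op hS a b mid ha hb
    · intro hnil
      have := congrArg List.length hnil
      rw [pvZipMapLen _ _ _ hlenNI hlenNR, hlenNL] at this
      simp at this
    · rw [pvZipMapLen _ _ _ hlenNI hlenNR, hlenNL, hn]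
    · exact pvZipMapGood w _ _ _ hw hCgood

theorem pvFold (w n : Nat) (hw : 2 ≤ w) :
    ∀ (ops : List String) (m : List (List Int)), m ≠ [] → m.length = n →
      (∀ r ∈ m, r.length = w) →
      (∀ op ∈ ops, PySem.Str.pyGet? op 0 = some 'S' ∨ 2 ≤ n) →
      ops.foldl (pvStepA n) (pvPhi m) = pvPhi (ops.foldl pvStepB m)
      ∧ ops.foldl pvStepB m ≠ [] ∧ (ops.foldl pvStepB m).length = n
      ∧ ∀ r ∈ ops.foldl pvStepB m, r.length = w := by
  intro ops
  induction ops with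
  | nil => intro m hm hlen good _; exact ⟨rfl, hm, hlen, good⟩
  | cons op ops ih =>
    intro m hm hlen good hops
    obtain ⟨s1, s2, s3, s4⟩ := pvStepEq w n hw op m hm hlen good (hops op (by simp))
    rw [List.foldl_cons, List.foldl_cons, s1]
    exact ih (pvStepB m op) s2 s3 s4 (fun o ho => hops o (by simp [ho]))

theorem pvInitPhi (rc : List (List Int)) (w : Nat)
    (hw : (rc.headD []).length = w) (h1 : 1 ≤ w) (hrect : ∀ r ∈ rc, r.length = w) :
    pvInit rc = pvPhi rc := by
  unfold pvInit pvPhi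
  refine congrArg₂ Prod.mk ?_ (congrArg₂ Prod.mk ?_ ?_)
  · simp only [pvSlice11]; rfl
  · rw [PySem.List.pyRange_zero_nat, List.map_map]
    rw [show ((fun i => PySem.List.pyGetD (PySem.List.pyGetD rc i []) 0 0) ∘ fun k : Nat => (k : Int))
        = fun k : Nat => (rc.getD k []).headD 0 from by
      funext k
      simp only [Function.comp_apply, PySem.List.pyGetD_natCast, pvGet0]]
    exact pvMapRangeGetD rc (fun r => r.headD 0) []
  · rw [PySem.List.pyRange_zero_nat, List.map_map]
    rw [show ((fun i => PySem.List.pyGetD (PySem.List.pyGetD rc i [])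
          (((rc.headD []).length : Int) - 1) 0) ∘ fun k : Nat => (k : Int))
        = fun k : Nat => PySem.List.pyGetD (rc.getD k []) (((rc.headD []).length : Int) - 1) 0 from by
      funext k
      simp only [Function.comp_apply, PySem.List.pyGetD_natCast]]
    rw [pvMapRangeGetD rc (fun r => PySem.List.pyGetD r (((rc.headD []).length : Int) - 1) 0) []]
    apply List.map_congr_left
    intro r hr
    have hr1 : r ≠ [] := by
      intro h
      have := hrect r hr
      rw [h] at this
      simp at this
      omega
    rw [hw]
    exact pvGetDLast r 0 w hr1 (hrect r hr)

theorem pvRecon (M : List (List Int)) (w n : Nat) (hw : 2 ≤ w) (hlen : M.length = n)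
    (good : ∀ r ∈ M, r.length = w) :
    (PySem.List.pyRange 0 (n : Int) 1).map
      (fun i => PySem.List.pyGetD (M.map pvHd) i 0 ::
        (PySem.List.pyGetD (M.map pvInn) i [] ++ [PySem.List.pyGetD (M.map pvLst) i 0])) = M := by
  rw [PySem.List.pyRange_zero_nat, List.map_map]
  apply List.ext_getElem
  · simp [hlen]
  · intro i h1 h2
    simp only [List.getElem_map, List.getElem_range, Function.comp_apply,
      PySem.List.pyGetD_natCast]
    have hi : i < M.length := h2
    have hih : i < (M.map pvHd).length := by simpa using hi
    have hii : i < (M.map pvInn).length := by simpa using hi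
    have hil : i < (M.map pvLst).length := by simpa using hi
    rw [List.getD_eq_getElem _ _ hih, List.getD_eq_getElem _ _ hii, List.getD_eq_getElem _ _ hil]
    simp only [List.getElem_map]
    have : M[i].length = w := good M[i] (List.getElem_mem hi)
    exact pvReassemble M[i] 0 0 (this ▸ hw)

-- ===== VERDICT (by name: the statement is the Claim_ definition above) =====
theorem solution_spec : Claim_unchanged_solution := by
  intro rc ops hDom hPre
  unfold Spec_solution
  intro hD
  obtain ⟨hops0, hnemp, hrect, hw1⟩ := hPre
  by_cases hrc : rc = []
  · have hopsnil : ops = [] := by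
      by_contra h
      exact (hnemp h) hrc
    subst hrc; subst hopsnil
    rfl
  · have hw1' : 1 ≤ (rc.headD []).length := hw1 hrc
    have hwne1 : (rc.headD []).length ≠ 1 := by
      intro h
      exact hD (Or.inl ⟨hrc, h⟩)
    have hw2 : 2 ≤ (rc.headD []).length := by omega
    have hlen1 : 1 ≤ rc.length := by
      cases rc with
      | nil => exact absurd rfl hrc
      | cons x t => simp
    have hops2 : ∀ op ∈ ops, PySem.Str.pyGet? op 0 = some 'S' ∨ 2 ≤ rc.length := by
      intro op hop
      by_cases hn1 : rc.length = 1
      · by_cases hS : PySem.Str.pyGet? op 0 = some 'S'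
        · exact Or.inl hS
        · exact absurd (Or.inr ⟨hn1, op, hop, hS⟩) hD
      · exact Or.inr (by omega)
    obtain ⟨hfold, hne', hlen', hgood'⟩ :=
      pvFold (rc.headD []).length rc.length hw2 ops rc hrc rfl (fun r hr => hrect r hr) hops2
    rw [pvSolutionEq, pvAltEq]
    rw [pvInitPhi rc (rc.headD []).length rfl (by omega) (fun r hr => hrect r hr)]
    rw [hfold]
    exact pvRecon (ops.foldl pvStepB rc) (rc.headD []).length rc.length hw2 hlen' hgood'

theorem solution_changed : Claim_changed_solution := by unfold Claim_changed_solution; decide
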